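-- pv_equiv track=rewrite | github.com/Luka-R-Lukacevic/sinogram_processing | helper_functions.py | find_middle_values
-- ===== SOURCE A (Python) =====
-- def find_middle_values(lst):
--     # Split the list into two sublists at the first occurrence of a gap of more than one element
--     sublists = []
--     current_sublist = []
--     for i, value in enumerate(lst):
--         if i > 0 and lst[i] - lst[i-1] > 1:
--             sublists.append(current_sublist)
--             current_sublist = []
--         current_sublist.append(value)
--     sublists.append(current_sublist)
--
--     # Find the middle value of each sublist
--     middle_values = []
--     for sublist in sublists:
--         middle_index = len(sublist) // 2
--         middle_values.append(sublist[middle_index])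
--
--     return middle_values
-- ===== SOURCE B (Python) =====
-- def find_middle_values(lst):
--     # One linear pass tracking only the start index of the current run;
--     # each run's middle element is read directly from lst by index.
--     middle_values = []
--     n = len(lst)
--     start = 0
--     for i in range(1, n):
--         if lst[i] - lst[i - 1] > 1:
--             middle_values.append(lst[start + (i - start) // 2])
--             start = i
--     middle_values.append(lst[start + (n - start) // 2])
--     return middle_values
-- ===== Notes on version B (the rewrite author's own statement) =====
-- stated objective: simpler
-- what changed: B never materialises the list of sublists: a single pass keeps only the start index of the current run and reads each run's middle element directly from lst by index.
import Mathlib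
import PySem

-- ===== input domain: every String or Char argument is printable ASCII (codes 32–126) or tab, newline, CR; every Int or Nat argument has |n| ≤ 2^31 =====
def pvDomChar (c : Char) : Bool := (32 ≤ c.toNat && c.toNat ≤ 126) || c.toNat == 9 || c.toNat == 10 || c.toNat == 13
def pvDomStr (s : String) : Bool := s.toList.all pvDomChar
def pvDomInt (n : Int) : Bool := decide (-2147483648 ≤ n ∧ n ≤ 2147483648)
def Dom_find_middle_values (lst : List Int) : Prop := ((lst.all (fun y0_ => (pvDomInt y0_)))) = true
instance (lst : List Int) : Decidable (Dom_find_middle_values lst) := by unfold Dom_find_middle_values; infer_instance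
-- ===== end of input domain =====

-- B replaces A's build-list-of-sublists-then-map-middles with one pass that keeps only the
-- start index of the current run and reads each middle directly from lst (objective: simpler).

-- ===== PORT A =====
-- Loop 1: split into sublists at gaps > 1 (enumerate); loop 2: append middle of each sublist.
def find_middle_values (lst : List Int) : List Int :=
  let st := (PySem.List.enumerate lst 0).foldl
    (fun (st : List (List Int) × List Int) (p : Int × Int) =>
      if p.1 > 0 ∧ PySem.List.pyGetD lst p.1 0 - PySem.List.pyGetD lst (p.1 - 1) 0 > 1 then
        (st.1 ++ [st.2], [] ++ [p.2])
      else (st.1, st.2 ++ [p.2])) ([], [])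
  let sublists := st.1 ++ [st.2]
  sublists.foldl
    (fun acc sub => acc ++ [PySem.List.pyGetD sub (PySem.Int.floordiv (sub.length : Int) 2) 0]) []

-- ===== PORT B =====
-- Single pass over indices 1..n-1 keeping (middle_values, start); close the final run after.
def find_middle_values_alt (lst : List Int) : List Int :=
  let n : Int := lst.length
  let st := (PySem.List.pyRange 1 n 1).foldl
    (fun (st : List Int × Int) (i : Int) =>
      if PySem.List.pyGetD lst i 0 - PySem.List.pyGetD lst (i - 1) 0 > 1 then
        (st.1 ++ [PySem.List.pyGetD lst (st.2 + PySem.Int.floordiv (i - st.2) 2) 0], i)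
      else st) ([], 0)
  st.1 ++ [PySem.List.pyGetD lst (st.2 + PySem.Int.floordiv (n - st.2) 2) 0]

-- ===== PRECONDITION & SPEC =====
-- On the empty list Python A raises IndexError (the final empty sublist's [0]); B raises too; excluded.
def Pre_find_middle_values (lst : List Int) : Prop := lst ≠ []
instance (lst : List Int) : Decidable (Pre_find_middle_values lst) := by
  unfold Pre_find_middle_values; infer_instance
def pvWitness_find_middle_values : List Int := [1, 2, 5, 6, 7]

def Spec_find_middle_values (lst : List Int) (out : List Int) : Prop := out = find_middle_values_alt lst
instance (lst : List Int) (out : List Int) : Decidable (Spec_find_middle_values lst out) := by unfold Spec_find_middle_values; infer_instance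

-- ===== CLAIM (what is proved, stated in full; the proofs are below) =====
def Claim_equal_find_middle_values : Prop := ∀ (lst : List Int), Dom_find_middle_values lst → Pre_find_middle_values lst → Spec_find_middle_values lst (find_middle_values lst)

-- ===== LEMMAS AND PROOFS =====

-- proof-only abbreviations for the two loop bodies and the 'middle of a sublist' map
def pvG (lst : List Int) (j : Int) : Int := PySem.List.pyGetD lst j 0
def pvMid (sub : List Int) : Int :=
  PySem.List.pyGetD sub (PySem.Int.floordiv (sub.length : Int) 2) 0
def pvStepA (lst : List Int) (st : List (List Int) × List Int) (p : Int × Int) :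
    List (List Int) × List Int :=
  if p.1 > 0 ∧ PySem.List.pyGetD lst p.1 0 - PySem.List.pyGetD lst (p.1 - 1) 0 > 1 then
    (st.1 ++ [st.2], [] ++ [p.2])
  else (st.1, st.2 ++ [p.2])
def pvStepB (lst : List Int) (st : List Int × Int) (i : Int) : List Int × Int :=
  if PySem.List.pyGetD lst i 0 - PySem.List.pyGetD lst (i - 1) 0 > 1 then
    (st.1 ++ [PySem.List.pyGetD lst (st.2 + PySem.Int.floordiv (i - st.2) 2) 0], i)
  else st

theorem pvMid_run (lst : List Int) (s k : Nat) (hs : s < k) (hk : k ≤ lst.length) :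
    pvMid ((lst.drop s).take (k - s)) =
      pvG lst ((s : Int) + PySem.Int.floordiv ((k : Int) - (s : Int)) 2) := by
  have hm : (k - s) / 2 < k - s := by omega
  have hlen : ((lst.drop s).take (k - s)).length = k - s := by simp; omega
  have hcast : (k : Int) - (s : Int) = ((k - s : Nat) : Int) := by omega
  unfold pvMid pvG
  rw [hlen, hcast]
  rw [show PySem.Int.floordiv ((k - s : Nat) : Int) 2 = (((k - s) / 2 : Nat) : Int) by
    exact_mod_cast PySem.Int.floordiv_natCast (k - s) 2]
  rw [show (s : Int) + (((k - s) / 2 : Nat) : Int) = ((s + (k - s) / 2 : Nat) : Int) by push_cast; ring]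
  rw [PySem.List.pyGetD_natCast, PySem.List.pyGetD_natCast]
  rw [List.getD_eq_getElem?_getD, List.getD_eq_getElem?_getD]
  rw [List.getElem?_take, List.getElem?_drop]
  simp [hm, List.getElem?_eq_getElem (by omega : s + (k - s) / 2 < lst.length)]

theorem pvInvariant (lst : List Int) (k : Nat) (h1 : 1 ≤ k) (hk : k ≤ lst.length) :
    ∃ (S : List (List Int)) (s : Nat),
      ((PySem.List.pyRange 0 (k : Int) 1).map (fun j => (j, pvG lst j))).foldl
          (pvStepA lst) ([], []) = (S, (lst.drop s).take (k - s)) ∧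
      (PySem.List.pyRange 1 (k : Int) 1).foldl (pvStepB lst) ([], 0) = (S.map pvMid, (s : Int)) ∧
      s < k := by
  induction k with
  | zero => omega
  | succ k ih =>
    by_cases hk1 : k = 0
    · subst hk1
      refine ⟨[], 0, ?_, ?_, by omega⟩
      · rw [show ((1 : Nat) : Int) = 0 + 1 by norm_num, PySem.List.pyRange_one_singleton]
        simp [pvStepA]
        cases lst with
        | nil => simp at hk
        | cons a t => simp [pvG, PySem.List.pyGetD_zero_cons]
      · rw [show ((1 : Nat) : Int) = 1 by norm_num, PySem.List.pyRange_one_eq_nil le_rfl]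
        simp
    · have h1k : 1 ≤ k := by omega
      obtain ⟨S, s, hA, hB, hs⟩ := ih h1k (by omega)
      have hsplitA : PySem.List.pyRange 0 ((k + 1 : Nat) : Int) 1
          = PySem.List.pyRange 0 (k : Nat) 1 ++ [(k : Int)] := by
        push_cast
        exact PySem.List.pyRange_one_succ_right (by positivity)
      have hsplitB : PySem.List.pyRange 1 ((k + 1 : Nat) : Int) 1
          = PySem.List.pyRange 1 (k : Nat) 1 ++ [(k : Int)] := by
        push_cast
        exact PySem.List.pyRange_one_succ_right (by exact_mod_cast h1k)
      rw [hsplitA, hsplitB, List.map_append, List.foldl_append, List.foldl_append, hA, hB]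
      simp only [List.map_cons, List.map_nil, List.foldl_cons, List.foldl_nil]
      by_cases hc : PySem.List.pyGetD lst (k : Int) 0 - PySem.List.pyGetD lst ((k : Int) - 1) 0 > 1
      · refine ⟨S ++ [(lst.drop s).take (k - s)], k, ?_, ?_, by omega⟩
        · unfold pvStepA
          have : ((k : Int) > 0 ∧ PySem.List.pyGetD lst (k : Int) 0 - PySem.List.pyGetD lst ((k : Int) - 1) 0 > 1) := ⟨by exact_mod_cast h1k, hc⟩
          rw [if_pos this]
          have hkl : k < lst.length := by omega
          simp only [Nat.add_sub_cancel_left, pvG]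
          rw [List.take_add_one]
          simp [List.getElem?_drop,
            PySem.List.pyGetD_natCast, List.getD_eq_getElem?_getD,
            List.getElem?_eq_getElem hkl]
        · unfold pvStepB
          rw [if_pos hc]
          simp only [List.map_append, List.map_cons, List.map_nil]
          rw [pvMid_run lst s k hs (by omega)]
          rfl
      · refine ⟨S, s, ?_, ?_, by omega⟩
        · unfold pvStepA
          rw [if_neg (fun h => hc (by simpa using h.2))]
          have hkl : k < lst.length := by omega
          simp only [pvG]
          have harr : (lst.drop s).take (k - s) ++ [PySem.List.pyGetD lst (k : Int) 0]
              = (lst.drop s).take (k + 1 - s) := by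
            rw [show k + 1 - s = (k - s) + 1 by omega, List.take_add_one]
            simp [List.getElem?_drop, show s + (k - s) = k by omega,
              List.getElem?_eq_getElem hkl, PySem.List.pyGetD_natCast,
              List.getD_eq_getElem?_getD]
          rw [← harr]
        · unfold pvStepB
          rw [if_neg hc]

theorem pvPortA_fold (lst : List Int) :
    find_middle_values lst =
      (let st := (PySem.List.enumerate lst 0).foldl (pvStepA lst) ([], [])
       (st.1 ++ [st.2]).foldl (fun acc sub => acc ++ [pvMid sub]) []) := rfl

theorem pvPortB_fold (lst : List Int) :
    find_middle_values_alt lst =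
      (let st := (PySem.List.pyRange 1 (lst.length : Int) 1).foldl (pvStepB lst) ([], 0)
       st.1 ++ [pvG lst (st.2 + PySem.Int.floordiv ((lst.length : Int) - st.2) 2)]) := rfl

-- ===== VERDICT (by name: the statement is the Claim_ definition above) =====
theorem find_middle_values_spec : Claim_equal_find_middle_values := by
  intro lst _ hpre
  have hn : 1 ≤ lst.length := by
    cases lst with
    | nil => exact absurd rfl hpre
    | cons a t => simp
  obtain ⟨S, s, hA, hB, hs⟩ := pvInvariant lst lst.length hn le_rfl
  unfold Spec_find_middle_values
  rw [pvPortA_fold, pvPortB_fold]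
  simp only []
  rw [PySem.List.enumerate_eq_map_pyRange (d := 0)]
  rw [show (fun j => ((j : Int), PySem.List.pyGetD lst j 0)) = (fun j => (j, pvG lst j)) from rfl]
  simp only [PySem.List.len_eq]
  rw [hA, hB]
  rw [PySem.List.foldl_append_singleton_eq_map]
  simp only [List.map_append, List.map_cons, List.map_nil, List.nil_append]
  rw [pvMid_run lst s lst.length hs le_rfl]
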